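-- pv_equiv track=rewrite | github.com/cjohnson7777/algorithm_practice | Codepath/u2_s1.py | best_set
-- ===== SOURCE A (Python) =====
-- def best_set(votes):
--     freq = {}
--     best = ""
--     biggest = 0
--
--     for artist in votes.values():
--         freq[artist] = 1 + freq.get(artist, 0)
--         # best = this artist if artist's vote count is equal to the highest vote count else its just what best was previously
--         best = artist if freq[artist] == max(freq.values()) else best
--
--         # if freq[artist] > biggest:
--         #     best = artist
--
--     return best
-- ===== SOURCE B (Python) =====
-- def best_set(votes):
--     # Two staged passes: build the full frequency table, take its maximum M,
--     # then re-scan the votes and remember the LAST artist whose running count reaches M.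
--     vals = list(votes.values())
--     freq = {}
--     for a in vals:
--         freq[a] = freq.get(a, 0) + 1
--     if not freq:
--         return ""
--     m = max(freq.values())
--     best = ""
--     counts = {}
--     for a in vals:
--         c = counts.get(a, 0) + 1
--         counts[a] = c
--         if c == m:
--             best = a
--     return best
-- ===== Notes on version B (the rewrite author's own statement) =====
-- stated objective: faster
-- what changed: B replaces A's per-vote rescan of max(freq.values()) by two staged passes: build the full frequency table, compute its maximum M once, then re-scan the votes and keep the last artist whose running count reaches exactly M.
import Mathlib
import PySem

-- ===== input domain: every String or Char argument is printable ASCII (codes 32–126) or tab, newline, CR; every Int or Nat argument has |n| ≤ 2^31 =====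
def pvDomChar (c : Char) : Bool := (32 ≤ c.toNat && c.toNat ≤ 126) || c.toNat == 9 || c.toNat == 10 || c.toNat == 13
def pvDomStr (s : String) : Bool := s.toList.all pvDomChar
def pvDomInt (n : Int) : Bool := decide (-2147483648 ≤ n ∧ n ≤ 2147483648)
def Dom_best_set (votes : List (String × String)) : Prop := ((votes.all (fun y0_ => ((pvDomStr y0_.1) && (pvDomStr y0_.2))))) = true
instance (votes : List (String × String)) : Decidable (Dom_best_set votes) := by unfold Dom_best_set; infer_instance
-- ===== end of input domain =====

-- B builds the frequency table once, takes its maximum M, and re-scans the votes keeping the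
-- last artist whose running count reaches M — removing A's per-vote rescan of max(freq.values()).

-- ===== PORT A =====
-- A's loop: freq[artist] = 1 + freq.get(artist, 0); best = artist if freq[artist] == max(freq.values()) else best.
-- freq[artist] is present right after the insertion and freq.values() is nonempty there, so getD 0 is exact.
-- (A's variable `biggest = 0` is assigned once and never read; it does not appear in the port.)
def bestSetLoopA (freq : PySem.Dict String Int) (best : String) (l : List String) : String :=
  match l with
  | [] => best
  | artist :: rest =>
    let freq' := freq.insert artist (1 + freq.getD artist 0)
    let best' := if freq'.getD artist 0 = (PySem.List.max? freq'.values (fun v => v)).getD 0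
                 then artist else best
    bestSetLoopA freq' best' rest

def best_set (votes : List (String × String)) : String :=
  bestSetLoopA PySem.Dict.empty "" (PySem.Dict.ofList votes).values

-- ===== PORT B =====
-- first pass: freq[a] = freq.get(a, 0) + 1 over all votes
def bestSetBuild (freq : PySem.Dict String Int) (l : List String) : PySem.Dict String Int :=
  match l with
  | [] => freq
  | a :: rest => bestSetBuild (freq.insert a (freq.getD a 0 + 1)) rest

-- second pass: running counts; whenever a count reaches exactly m, best = a
def bestSetScan (m : Int) (counts : PySem.Dict String Int) (best : String) (l : List String) : String :=
  match l with
  | [] => best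
  | a :: rest =>
    let c := counts.getD a 0 + 1
    bestSetScan m (counts.insert a c) (if c = m then a else best) rest

def best_set_alt (votes : List (String × String)) : String :=
  let vals := (PySem.Dict.ofList votes).values
  let freq := bestSetBuild PySem.Dict.empty vals
  if freq.items = [] then ""
  else
    let m := (PySem.List.max? freq.values (fun v => v)).getD 0
    bestSetScan m PySem.Dict.empty "" vals

-- ===== PRECONDITION & SPEC =====
def Spec_best_set (votes : List (String × String)) (out : String) : Prop := out = best_set_alt votes
instance (votes : List (String × String)) (out : String) : Decidable (Spec_best_set votes out) := by unfold Spec_best_set; infer_instance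

-- ===== CLAIM (what is proved, stated in full; the proofs are below) =====
def Claim_equal_best_set : Prop := ∀ (votes : List (String × String)), Dom_best_set votes → Spec_best_set votes (best_set votes)

-- ===== LEMMAS AND PROOFS =====

-- shifting a larger seed out of a running max
lemma foldl_max_pair (L : List Int) (init v0 c : Int) (h : v0 < c) :
    L.foldl max (max init c) = max (L.foldl max (max init v0)) c := by
  rw [max_comm init c, List.foldl_assoc, max_comm init v0, List.foldl_assoc]
  omega

-- replacing the (unique) entry with key `a`, whose value v0 grows to c, turns the
-- running max of the values into `max (old running max) c`
lemma foldl_max_replace (a : String) (v0 c : Int) (hvc : v0 < c) :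
    ∀ (items : List (String × Int)) (init : Int),
      (a, v0) ∈ items → (items.map Prod.fst).Nodup →
      ((items.map (fun p => if p.1 == a then (a, c) else p)).map Prod.snd).foldl max init
        = max ((items.map Prod.snd).foldl max init) c := by
  intro items
  induction items with
  | nil => intro init h _; cases h
  | cons hd rest ih =>
    intro init hmem hnd
    by_cases hk : hd.1 = a
    · have hdrest : ∀ p ∈ rest, p.1 ≠ a := by
        intro p hp hpa
        rw [List.map_cons, List.nodup_cons] at hnd
        exact hnd.1 (by rw [hk]; exact List.mem_map.mpr ⟨p, hp, hpa⟩)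
      have hv : hd.2 = v0 := by
        rcases List.mem_cons.mp hmem with h | h
        · rw [← h]
        · exact absurd rfl (hdrest _ h)
      have hmap : rest.map (fun p => if p.1 == a then (a, c) else p) = rest := by
        apply List.map_congr_left ?_ |>.trans (List.map_id rest)
        intro p hp
        simp [hdrest p hp]
      simp only [List.map_cons, hmap, List.foldl_cons]
      simp only [hk, beq_self_eq_true, if_pos]
      rw [hv]
      exact foldl_max_pair _ init v0 c hvc
    · have hmem' : (a, v0) ∈ rest := by
        rcases List.mem_cons.mp hmem with h | h
        · exact absurd (by rw [← h]) hk
        · exact h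
      have hnd' : (rest.map Prod.fst).Nodup := by
        rw [List.map_cons, List.nodup_cons] at hnd
        exact hnd.2
      simp only [List.map_cons, List.foldl_cons]
      have : (if hd.1 == a then (a, c) else hd) = hd := by simp [hk]
      rw [this]
      exact ih (max init hd.2) hmem' hnd'

-- inserting the incremented count of `a` updates the running max of all values
lemma foldl_max_insert (d : PySem.Dict String Int) (a : String) (hnd : d.keys.Nodup) :
    ((d.insert a (d.getD a 0 + 1)).values).foldl max 0
      = max (d.values.foldl max 0) (d.getD a 0 + 1) := by
  by_cases hc : d.contains a = true
  · have hsome : (d.get? a).isSome := by rw [← PySem.Dict.contains_eq_isSome_get?]; exact hc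
    obtain ⟨v0, hv0⟩ := Option.isSome_iff_exists.mp hsome
    have hgetD : d.getD a 0 = v0 := PySem.Dict.getD_of_get?_eq_some d 0 hv0
    have hmem : (a, v0) ∈ d.items := PySem.Dict.mem_items_of_get?_eq_some d hv0
    have hitems := PySem.Dict.items_insert_of_contains (d := d) (k := a)
      (v := d.getD a 0 + 1) hc
    simp only [PySem.Dict.values, hitems]
    have hndi : (d.items.map Prod.fst).Nodup := by
      simpa [PySem.Dict.keys] using hnd
    rw [hgetD]
    exact foldl_max_replace a v0 (v0 + 1) (by omega) d.items 0 hmem hndi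
  · have hc' : d.contains a = false := by simpa using hc
    have hgetD : d.getD a 0 = 0 := PySem.Dict.getD_of_not_contains d 0 hc'
    have hitems := PySem.Dict.items_insert_of_not_contains (d := d) (k := a)
      (v := d.getD a 0 + 1) hc'
    simp only [PySem.Dict.values, hitems, List.map_append, List.foldl_append]
    simp [hgetD]

-- Python's max over a nonempty list of nonnegative ints is the 0-seeded running max
lemma max?_getD_eq_foldl (l : List Int) (hne : l ≠ []) (hnn : ∀ v ∈ l, 0 ≤ v) :
    (PySem.List.max? l (fun v => v)).getD 0 = l.foldl max 0 := by
  cases l with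
  | nil => exact absurd rfl hne
  | cons x t =>
    rw [PySem.List.max?_id_cons]
    simp only [Option.getD_some, List.foldl_cons]
    rw [max_eq_right (hnn x (List.mem_cons_self))]

lemma getD_zero_nonneg (d : PySem.Dict String Int) (hnn : ∀ v ∈ d.values, 0 ≤ v)
    (a : String) : 0 ≤ d.getD a 0 := by
  cases h : d.get? a with
  | none => rw [PySem.Dict.getD_of_get?_eq_none d 0 h]
  | some v =>
    rw [PySem.Dict.getD_of_get?_eq_some d 0 h]
    have : (a, v) ∈ d.items := PySem.Dict.mem_items_of_get?_eq_some d h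
    exact hnn v (by simp only [PySem.Dict.values]; exact List.mem_map.mpr ⟨(a, v), this, rfl⟩)

lemma values_insert_ne_nil (d : PySem.Dict String Int) (a : String) (c : Int) :
    (d.insert a c).values ≠ [] := by
  have h : a ∈ (d.insert a c).keys := (PySem.Dict.mem_keys_insert d a a c).mpr (Or.inl rfl)
  intro hv
  simp only [PySem.Dict.values, List.map_eq_nil_iff] at hv
  simp [PySem.Dict.keys, hv] at h

-- a stored count never shrinks while the frequency table is being built
lemma getD_le_build : ∀ (l : List String) (d : PySem.Dict String Int) (k : String),
    d.getD k 0 ≤ (bestSetBuild d l).getD k 0 := by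
  intro l
  induction l with
  | nil => intro d k; exact le_refl _
  | cons a rest ih =>
    intro d k
    refine le_trans ?_ (ih (d.insert a (d.getD a 0 + 1)) k)
    rw [PySem.Dict.getD_insert]
    split_ifs with h
    · subst h; omega
    · exact le_refl _

-- every stored count is bounded by the running max of the values
lemma getD_le_foldl_max (d : PySem.Dict String Int) (_hnn : ∀ v ∈ d.values, 0 ≤ v)
    (k : String) : d.getD k 0 ≤ d.values.foldl max 0 := by
  cases h : d.get? k with
  | none =>
    rw [PySem.Dict.getD_of_get?_eq_none d 0 h]
    exact (PySem.List.le_foldl_max d.values 0).1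
  | some v =>
    rw [PySem.Dict.getD_of_get?_eq_some d 0 h]
    have : (k, v) ∈ d.items := PySem.Dict.mem_items_of_get?_eq_some d h
    exact (PySem.List.le_foldl_max d.values 0).2 v
      (by simp only [PySem.Dict.values]; exact List.mem_map.mpr ⟨(k, v), this, rfl⟩)

-- nonnegative values are preserved by the build pass
lemma build_nonneg : ∀ (l : List String) (d : PySem.Dict String Int),
    (∀ v ∈ d.values, 0 ≤ v) → ∀ v ∈ (bestSetBuild d l).values, 0 ≤ v := by
  intro l
  induction l with
  | nil => intro d h; exact h
  | cons a rest ih =>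
    intro d h
    refine ih _ ?_
    intro v hv
    rcases PySem.Dict.mem_values_insert d a (d.getD a 0 + 1) v hv with h1 | h1
    · have := getD_zero_nonneg d h a; omega
    · exact h v h1

-- the build pass never empties the value list
lemma build_values_ne_nil : ∀ (l : List String) (d : PySem.Dict String Int),
    d.values ≠ [] → (bestSetBuild d l).values ≠ [] := by
  intro l
  induction l with
  | nil => intro d h; exact h
  | cons a rest ih => intro d _; exact ih _ (values_insert_ne_nil d a _)

-- main invariant: with m the max of the FULL frequency table, A's loop result equals the
-- 'last running count to reach m' scan, provided the bests already agree once the prefix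
-- max has reached m
lemma loop_eq (m : Int) : ∀ (l : List String) (d : PySem.Dict String Int) (bA bB : String),
    d.keys.Nodup → (∀ v ∈ d.values, 0 ≤ v) →
    d.values.foldl max 0 ≤ m →
    (bestSetBuild d l).values.foldl max 0 = m →
    (d.values.foldl max 0 = m → bA = bB) →
    bestSetLoopA d bA l = bestSetScan m d bB l := by
  intro l
  induction l with
  | nil =>
    intro d bA bB _ _ _ hm hb
    exact hb hm
  | cons a rest ih =>
    intro d bA bB hnd hnn hle hm hb
    have hcomm : (1 : Int) + d.getD a 0 = d.getD a 0 + 1 := by ring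
    have hg0 : 0 ≤ d.getD a 0 := getD_zero_nonneg d hnn a
    simp only [bestSetLoopA, bestSetScan, bestSetBuild, hcomm] at *
    set c : Int := d.getD a 0 + 1 with hc
    set d' : PySem.Dict String Int := d.insert a c with hd'
    have hnd' : d'.keys.Nodup := PySem.Dict.nodup_keys_insert d a c hnd
    have hnn' : ∀ v ∈ d'.values, 0 ≤ v := by
      intro v hv
      rcases PySem.Dict.mem_values_insert d a c v hv with h | h
      · omega
      · exact hnn v h
    have hM : d'.values.foldl max 0 = max (d.values.foldl max 0) c :=
      foldl_max_insert d a hnd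
    -- c never exceeds m: the final count of a dominates it, and m dominates all final counts
    have hcm : c ≤ m := by
      have h1 : d'.getD a 0 ≤ (bestSetBuild d' rest).getD a 0 := getD_le_build rest d' a
      have h2 : (bestSetBuild d' rest).getD a 0 ≤ (bestSetBuild d' rest).values.foldl max 0 :=
        getD_le_foldl_max _ (build_nonneg rest d' hnn') a
      rw [PySem.Dict.getD_insert_self] at h1
      omega
    have hcond : d'.getD a 0 = (PySem.List.max? d'.values (fun v => v)).getD 0
        ↔ d.values.foldl max 0 ≤ c := by
      rw [PySem.Dict.getD_insert_self,
        max?_getD_eq_foldl d'.values (values_insert_ne_nil d a c) hnn', hM]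
      constructor <;> intro h <;> omega
    by_cases hbig : d.values.foldl max 0 ≤ c
    · rw [if_pos (hcond.mpr hbig)]
      by_cases hcmeq : c = m
      · rw [if_pos hcmeq]
        exact ih d' a a hnd' hnn' (by omega) hm (fun _ => rfl)
      · rw [if_neg hcmeq]
        exact ih d' a bB hnd' hnn' (by omega) hm (by rw [hM]; omega)
    · rw [if_neg (fun h => hbig (hcond.mp h)), if_neg (by omega : ¬ c = m)]
      exact ih d' bA bB hnd' hnn' (by rw [hM]; omega) hm
        (by rw [hM]; intro h; exact hb (by omega))

-- ===== VERDICT (by name: the statement is the Claim_ definition above) =====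
theorem best_set_spec : Claim_equal_best_set := by
  intro votes _
  unfold Spec_best_set best_set best_set_alt
  cases hv : (PySem.Dict.ofList votes).values with
  | nil => rfl
  | cons a rest =>
    have hne : (bestSetBuild PySem.Dict.empty (a :: rest)).values ≠ [] := by
      show (bestSetBuild (PySem.Dict.empty.insert a _) rest).values ≠ []
      exact build_values_ne_nil rest _ (values_insert_ne_nil _ a _)
    have hitems : ¬ (bestSetBuild PySem.Dict.empty (a :: rest)).items = [] := by
      intro h
      exact hne (by simp [PySem.Dict.values, h])
    have hnn : ∀ v ∈ (bestSetBuild PySem.Dict.empty (a :: rest)).values, 0 ≤ v :=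
      build_nonneg _ _ (by simp [PySem.Dict.values, PySem.Dict.empty])
    simp only [hitems, if_false]
    rw [max?_getD_eq_foldl _ hne hnn]
    exact loop_eq _ (a :: rest) PySem.Dict.empty "" ""
      (by simp [PySem.Dict.keys_empty])
      (by simp [PySem.Dict.values, PySem.Dict.empty])
      ((PySem.List.le_foldl_max _ 0).1)
      rfl
      (fun _ => rfl)
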